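-- pv_equiv track=rewrite | github.com/sy-hwang/MV-Adapter | mvadapter/utils/saving.py | largest_factor_near_sqrt
-- ===== SOURCE A (Python) =====
-- import math
--
-- def largest_factor_near_sqrt(n: int) -> int:
--     """
--     Finds the largest factor of n that is closest to the square root of n.
--
--     Args:
--         n (int): The integer for which to find the largest factor near its square root.
--
--     Returns:
--         int: The largest factor of n that is closest to the square root of n.
--     """
--     sqrt_n = int(math.sqrt(n))  # Get the integer part of the square root
--
--     # First, check if the square root itself is a factor
--     if sqrt_n * sqrt_n == n:
--         return sqrt_n
--
--     # Otherwise, find the largest factor by iterating from sqrt_n downwards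
--     for i in range(sqrt_n, 0, -1):
--         if n % i == 0:
--             return i
--
--     # If n is 1, return 1
--     return 1
-- ===== SOURCE B (Python) =====
-- import math
--
-- def largest_factor_near_sqrt(n: int) -> int:
--     # Single upward scan with an accumulator: keep the largest divisor <= isqrt(n).
--     best = 0
--     for i in range(1, math.isqrt(n) + 1):
--         if n % i == 0:
--             best = i
--     return best
-- ===== Notes on version B (the rewrite author's own statement) =====
-- stated objective: simpler
-- what changed: Replaces A's perfect-square early-return branch plus downward early-return trial loop with a single upward scan keeping the largest divisor <= isqrt(n) in an accumulator (best=0 covers n==0).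
import Mathlib
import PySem

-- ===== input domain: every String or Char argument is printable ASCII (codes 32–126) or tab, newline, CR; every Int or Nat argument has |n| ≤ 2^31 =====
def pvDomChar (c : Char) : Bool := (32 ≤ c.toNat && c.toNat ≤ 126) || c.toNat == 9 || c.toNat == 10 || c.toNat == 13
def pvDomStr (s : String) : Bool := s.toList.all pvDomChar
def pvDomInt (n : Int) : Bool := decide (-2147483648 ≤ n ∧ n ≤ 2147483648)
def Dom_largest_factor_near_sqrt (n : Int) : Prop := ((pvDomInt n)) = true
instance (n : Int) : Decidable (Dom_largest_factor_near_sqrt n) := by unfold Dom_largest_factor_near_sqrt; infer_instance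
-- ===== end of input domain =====

-- B replaces A's perfect-square branch + downward early-return loop by one upward
-- accumulator scan keeping the largest divisor ≤ isqrt(n); simpler, same cost.

-- ===== PORT A =====
-- int(math.sqrt(n)): exact equals Nat.sqrt on 0 ≤ n ≤ 2^31 (double sqrt is correctly
-- rounded there); raises ValueError for n < 0, excluded by Pre_.
def largest_factor_near_sqrt (n : Int) : Int :=
  let sqrt_n : Int := (Nat.sqrt n.toNat : Nat)
  if sqrt_n * sqrt_n = n then sqrt_n
  else
    -- for i in range(sqrt_n, 0, -1): if n % i == 0: return i  — first hit
    match (PySem.List.pyRange sqrt_n 0 (-1)).find? (fun i => PySem.Int.mod n i == 0) with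
    | some i => i
    | none => 1

-- ===== PORT B =====
def largest_factor_near_sqrt_alt (n : Int) : Int :=
  (PySem.List.pyRange 1 (((Nat.sqrt n.toNat : Nat) : Int) + 1) 1).foldl
    (fun best i => if PySem.Int.mod n i == 0 then i else best) 0

-- ===== PRECONDITION & SPEC =====
-- math.sqrt (and B's math.isqrt) raise ValueError for negative n.
def Pre_largest_factor_near_sqrt (n : Int) : Prop := 0 ≤ n
instance (n : Int) : Decidable (Pre_largest_factor_near_sqrt n) := by unfold Pre_largest_factor_near_sqrt; infer_instance
def pvWitness_largest_factor_near_sqrt : Int := 12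

def Spec_largest_factor_near_sqrt (n : Int) (out : Int) : Prop := out = largest_factor_near_sqrt_alt n
instance (n : Int) (out : Int) : Decidable (Spec_largest_factor_near_sqrt n out) := by unfold Spec_largest_factor_near_sqrt; infer_instance

-- ===== CLAIM (what is proved, stated in full; the proofs are below) =====
def Claim_equal_largest_factor_near_sqrt : Prop := ∀ (n : Int), Dom_largest_factor_near_sqrt n → Pre_largest_factor_near_sqrt n → Spec_largest_factor_near_sqrt n (largest_factor_near_sqrt n)

-- ===== LEMMAS AND PROOFS =====

-- B's accumulator loop picks the LAST element satisfying P, i.e. the first of the reversed list.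
theorem foldl_pick_eq_find_reverse (l : List Int) (P : Int → Bool) (b : Int) :
    l.foldl (fun best i => if P i then i else best) b =
      (match l.reverse.find? P with | some x => x | none => b) := by
  induction l generalizing b with
  | nil => simp
  | cons a l ih =>
    simp only [List.foldl_cons, ih, List.reverse_cons, List.find?_append]
    cases h : l.reverse.find? P with
    | some x => simp
    | none => cases hP : P a <;> simp [hP, List.find?]

theorem largest_factor_near_sqrt_spec : Claim_equal_largest_factor_near_sqrt := by
  intro n _ hn
  have hn0 : (0:Int) ≤ n := hn
  unfold Spec_largest_factor_near_sqrt largest_factor_near_sqrt largest_factor_near_sqrt_alt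
  set s : Int := ((Nat.sqrt n.toNat : Nat) : Int) with hs
  have hrev : PySem.List.pyRange s 0 (-1) = (PySem.List.pyRange 1 (s + 1) 1).reverse := by
    simpa using PySem.List.pyRange_neg_one_eq_reverse s 0
  rw [foldl_pick_eq_find_reverse, ← hrev]
  by_cases h0 : n = 0
  · subst h0
    simp [hs, PySem.List.pyRange]
  · have hn1 : 1 ≤ n := by omega
    have hs1 : 1 ≤ s := by
      have hp : 0 < Nat.sqrt n.toNat := Nat.sqrt_pos.mpr (by omega)
      omega
    by_cases hper : s * s = n
    · -- perfect square: A returns s; B's (reversed) list starts with s and P s holds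
      have hfind : (PySem.List.pyRange s 0 (-1)).find? (fun i => PySem.Int.mod n i == 0) = some s := by
        rw [PySem.List.pyRange_neg_one_cons (by omega : (0:Int) < s)]
        have hdvd : s ∣ n := ⟨s, hper.symm⟩
        have : PySem.Int.mod n s = 0 := (PySem.Int.mod_eq_zero_iff_dvd n s).mpr hdvd
        simp [List.find?, this]
      simp [hper, hfind]
    · -- not a perfect square: both reduce to the same find?, which is some (1 is a divisor)
      have hmem : (1:Int) ∈ PySem.List.pyRange s 0 (-1) := by
        rw [PySem.List.mem_pyRange_neg_one]
        omega
      have hP1 : (fun i => PySem.Int.mod n i == 0) (1:Int) = true := by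
        simp [PySem.Int.mod]
      have hsome : ((PySem.List.pyRange s 0 (-1)).find? (fun i => PySem.Int.mod n i == 0)).isSome := by
        rw [List.find?_isSome]
        exact ⟨1, hmem, hP1⟩
      obtain ⟨i, hi⟩ := Option.isSome_iff_exists.mp hsome
      simp [hper, hi]

-- ===== VERDICT (by name: the statement is the Claim_ definition above) =====
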